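-- pv_equiv track=rewrite | github.com/jfbucas/wrapper_blackwood | parameters.py | get_heuristic_array_from_variations
-- ===== SOURCE A (Python) =====
-- def get_heuristic_array_from_variations(variations):
-- 	max_i = 0
-- 	for i in reversed(range(len(variations))):
-- 		if variations[i] != 0:
-- 			max_i =i
-- 			break
--
-- 	heuristic_array = []
-- 	cumulated = 0
-- 	for i in range(len(variations)):
-- 		if i <= max_i:
-- 			cumulated += variations[i]
-- 			heuristic_array.append( cumulated )
-- 		else:
-- 			heuristic_array.append( 0 )
--
--
-- 	return heuristic_array
-- ===== SOURCE B (Python) =====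
-- def get_heuristic_array_from_variations(variations):
-- 	# Index-free strategy: keep a countdown of nonzero entries still ahead.
-- 	# While some remain we are at or before the last nonzero position, so we
-- 	# emit the running total; once the countdown hits zero every later entry
-- 	# lies past the cutoff and gets 0.
-- 	remaining = sum(1 for v in variations if v != 0)
-- 	heuristic_array = []
-- 	cumulated = 0
-- 	for v in variations:
-- 		if remaining == 0:
-- 			heuristic_array.append(0)
-- 		else:
-- 			cumulated += v
-- 			heuristic_array.append(cumulated)
-- 			if v != 0:
-- 				remaining -= 1
-- 	return heuristic_array
-- ===== Notes on version B (the rewrite author's own statement) =====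
-- stated objective: alternative
-- what changed: A finds the cutoff by a backward index scan and compares loop indices against it; B has no indices at all: it counts the nonzero entries once and runs a countdown, switching to emitting zeros when no nonzero entries remain ahead.
import Mathlib
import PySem

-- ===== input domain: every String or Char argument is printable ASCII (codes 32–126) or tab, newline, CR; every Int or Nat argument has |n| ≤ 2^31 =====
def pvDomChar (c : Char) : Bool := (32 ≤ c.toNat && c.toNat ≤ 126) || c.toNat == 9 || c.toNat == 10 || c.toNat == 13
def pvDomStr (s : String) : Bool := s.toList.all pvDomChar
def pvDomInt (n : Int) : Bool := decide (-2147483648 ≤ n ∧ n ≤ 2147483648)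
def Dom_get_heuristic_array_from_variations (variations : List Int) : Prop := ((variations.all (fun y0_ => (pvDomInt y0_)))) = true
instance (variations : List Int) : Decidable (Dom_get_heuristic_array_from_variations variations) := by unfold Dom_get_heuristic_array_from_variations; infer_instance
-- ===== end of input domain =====

-- B replaces A's index cutoff (backward scan for the last nonzero index, positional
-- comparison in the loop) by an index-free countdown of the nonzero entries still ahead;
-- same return value on all inputs.

-- ===== PORT A =====
-- 'for i in reversed(range(len(variations))): if variations[i] != 0: max_i = i; break' (max_i starts at 0)
def pvAFind (variations : List Int) : List Int → Int
  | [] => 0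
  | i :: rest =>
      if PySem.List.pyGetD variations i 0 ≠ 0 then i else pvAFind variations rest

def get_heuristic_array_from_variations (variations : List Int) : List Int :=
  let max_i := pvAFind variations ((PySem.List.pyRange 0 (PySem.List.len variations) 1).reverse)
  let st := (PySem.List.pyRange 0 (PySem.List.len variations) 1).foldl
    (fun (st : Int × List Int) i =>
      if i ≤ max_i then
        (st.1 + PySem.List.pyGetD variations i 0,
         st.2 ++ [st.1 + PySem.List.pyGetD variations i 0])
      else (st.1, st.2 ++ [0])) (0, [])
  st.2

-- ===== PORT B =====
-- Source B's loop body; state is (cumulated, remaining, heuristic_array)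
def pvBStep (st : Int × Int × List Int) (v : Int) : Int × Int × List Int :=
  if st.2.1 = 0 then (st.1, st.2.1, st.2.2 ++ [0])
  else if v ≠ 0 then (st.1 + v, st.2.1 - 1, st.2.2 ++ [st.1 + v])
  else (st.1 + v, st.2.1, st.2.2 ++ [st.1 + v])

def get_heuristic_array_from_variations_alt (variations : List Int) : List Int :=
  let remaining : Int := variations.foldl (fun a v => if v ≠ 0 then a + 1 else a) 0
  let st := variations.foldl pvBStep (0, remaining, [])
  st.2.2

-- ===== PRECONDITION & SPEC =====
def Spec_get_heuristic_array_from_variations (variations : List Int) (out : List Int) : Prop := out = get_heuristic_array_from_variations_alt variations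
instance (variations : List Int) (out : List Int) : Decidable (Spec_get_heuristic_array_from_variations variations out) := by unfold Spec_get_heuristic_array_from_variations; infer_instance

-- ===== CLAIM (what is proved, stated in full; the proofs are below) =====
def Claim_equal_get_heuristic_array_from_variations : Prop := ∀ (variations : List Int), Dom_get_heuristic_array_from_variations variations → Spec_get_heuristic_array_from_variations variations (get_heuristic_array_from_variations variations)

-- ===== LEMMAS AND PROOFS =====

-- common functional spec: prefix sums while a nonzero lies ahead, zeros once the suffix is all-zero
def pvF : List Int → Int → List Int
  | [], _ => []
  | v :: t, c =>
      if (v :: t).all (· == 0) then List.replicate (v :: t).length 0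
      else (c + v) :: pvF t (c + v)

lemma pvF_allzero (xs : List Int) (c : Int) (h : ∀ x ∈ xs, x = 0) :
    pvF xs c = List.replicate xs.length 0 := by
  cases xs with
  | nil => simp [pvF]
  | cons v t =>
      have : (v :: t).all (· == 0) = true := by
        simp only [List.all_eq_true]; intro x hx; simpa using h x hx
      simp [pvF, this]

-- prefix sums "from c"
def pvPfx (c : Int) : List Int → List Int
  | [] => []
  | v :: t => (c + v) :: pvPfx (c + v) t

-- ---------- A = take/replicate form ----------

lemma pvAFind_rev (xs : List Int) (l : List Int) :
    pvAFind xs l.reverse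
      = l.foldl (fun acc i => if PySem.List.pyGetD xs i 0 ≠ 0 then i else acc) 0 := by
  induction l using List.reverseRecOn with
  | nil => simp [pvAFind]
  | append_singleton t i ih =>
      rw [List.reverse_append]
      simp only [List.reverse_cons, List.reverse_nil, List.nil_append, List.foldl_append,
        List.foldl_cons, List.foldl_nil, List.singleton_append]
      by_cases h : PySem.List.pyGetD xs i 0 ≠ 0
      · simp [pvAFind, h]
      · simp only [ne_eq, not_not] at h
        simp [pvAFind, h, ih]

lemma pvLast_nonneg (xs : List Int) : ∀ (s a : Int), 0 ≤ s → 0 ≤ a →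
    0 ≤ (PySem.List.enumerate xs s).foldl
      (fun (acc : Int) iv => if iv.2 ≠ 0 then iv.1 else acc) a := by
  induction xs with
  | nil => intro s a _ ha; simpa [PySem.List.enumerate_nil]
  | cons v t ih =>
      intro s a hs ha
      rw [PySem.List.enumerate_cons]
      simp only [List.foldl_cons]
      by_cases h : v = 0
      · simp only [h, ne_eq, not_true_eq_false, if_false]
        exact ih (s + 1) a (by omega) ha
      · simp only [ne_eq, h, not_false_eq_true, if_true]
        exact ih (s + 1) s (by omega) hs

lemma pvLoop_inv (xs : List Int) : ∀ (s m c : Int) (acc : List Int),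
    ((PySem.List.enumerate xs s).foldl
      (fun (st : Int × List Int) (p : Int × Int) =>
        if p.1 ≤ m then (st.1 + p.2, st.2 ++ [st.1 + p.2]) else (st.1, st.2 ++ [0]))
      (c, acc)).2
    = acc ++ (pvPfx c xs).take (m + 1 - s).toNat
          ++ List.replicate (xs.length - (m + 1 - s).toNat) 0 := by
  induction xs with
  | nil => intro s m c acc; simp [pvPfx, PySem.List.enumerate_nil]
  | cons v t ih =>
      intro s m c acc
      rw [PySem.List.enumerate_cons]
      simp only [List.foldl_cons, pvPfx]
      by_cases h : s ≤ m
      · simp only [h, if_true]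
        rw [ih]
        have h1 : (m + 1 - s).toNat = (m + 1 - (s + 1)).toNat + 1 := by omega
        rw [h1]
        simp only [List.take_succ_cons, List.length_cons]
        have h2 : t.length + 1 - ((m + 1 - (s + 1)).toNat + 1)
            = t.length - (m + 1 - (s + 1)).toNat := by omega
        rw [h2]
        simp
      · simp only [h, if_false]
        rw [ih]
        have h1 : (m + 1 - s).toNat = 0 := by omega
        have h2 : (m + 1 - (s + 1)).toNat = 0 := by omega
        rw [h1, h2]
        simp only [List.take_zero, Nat.sub_zero, List.length_cons,
          List.replicate_succ]
        simp

-- ---------- characterisation of the last-nonzero fold ----------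

def pvM (xs : List Int) : Int :=
  (PySem.List.enumerate xs 0).foldl (fun (acc : Int) iv => if iv.2 ≠ 0 then iv.1 else acc) 0

lemma pvM_shift (xs : List Int) : ∀ (s a : Int),
    (PySem.List.enumerate xs (s + 1)).foldl
      (fun (acc : Int) iv => if iv.2 ≠ 0 then iv.1 else acc) (a + 1)
    = (PySem.List.enumerate xs s).foldl
      (fun (acc : Int) iv => if iv.2 ≠ 0 then iv.1 else acc) a + 1 := by
  induction xs with
  | nil => intro s a; simp [PySem.List.enumerate_nil]
  | cons v t ih =>
      intro s a
      rw [PySem.List.enumerate_cons, PySem.List.enumerate_cons]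
      simp only [List.foldl_cons]
      by_cases h : v = 0
      · simp only [h, ne_eq, not_true_eq_false, if_false]
        exact ih (s + 1) a
      · simp only [ne_eq, h, not_false_eq_true, if_true]
        exact ih (s + 1) s

lemma pvM_init_irrel (xs : List Int) (hx : ∃ x ∈ xs, x ≠ 0) : ∀ (s a b : Int),
    (PySem.List.enumerate xs s).foldl
      (fun (acc : Int) iv => if iv.2 ≠ 0 then iv.1 else acc) a
    = (PySem.List.enumerate xs s).foldl
      (fun (acc : Int) iv => if iv.2 ≠ 0 then iv.1 else acc) b := by
  induction xs with
  | nil => simp at hx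
  | cons v t ih =>
      intro s a b
      rw [PySem.List.enumerate_cons]
      simp only [List.foldl_cons]
      by_cases h : v = 0
      · simp only [h, ne_eq, not_true_eq_false, if_false]
        have : ∃ x ∈ t, x ≠ 0 := by
          rcases hx with ⟨x, hx1, hx2⟩
          cases hx1 with
          | head => exact absurd h hx2
          | tail _ h' => exact ⟨x, h', hx2⟩
        exact ih this (s + 1) a b
      · simp [h]

lemma pvM_allzero (xs : List Int) (hx : ∀ x ∈ xs, x = 0) : ∀ (s a : Int),
    (PySem.List.enumerate xs s).foldl
      (fun (acc : Int) iv => if iv.2 ≠ 0 then iv.1 else acc) a = a := by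
  induction xs with
  | nil => intro s a; simp [PySem.List.enumerate_nil]
  | cons v t ih =>
      intro s a
      rw [PySem.List.enumerate_cons]
      simp only [List.foldl_cons, hx v List.mem_cons_self, ne_eq, not_true_eq_false, if_false]
      exact ih (fun x hxm => hx x (List.mem_cons_of_mem _ hxm)) (s + 1) a

lemma pvM_cons (v : Int) (t : List Int) :
    pvM (v :: t) = if ∃ x ∈ t, x ≠ 0 then pvM t + 1 else 0 := by
  unfold pvM
  rw [PySem.List.enumerate_cons]
  simp only [List.foldl_cons]
  have hz : (if v ≠ 0 then (0 : Int) else 0) = 0 := by split <;> rfl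
  rw [show (0 : Int) + 1 = 1 from rfl] at *
  by_cases hx : ∃ x ∈ t, x ≠ 0
  · simp only [hx, if_true]
    have h1 : (PySem.List.enumerate t (0 + 1)).foldl
        (fun (acc : Int) iv => if iv.2 ≠ 0 then iv.1 else acc) ((-1) + 1)
        = (PySem.List.enumerate t 0).foldl
        (fun (acc : Int) iv => if iv.2 ≠ 0 then iv.1 else acc) (-1) + 1 := pvM_shift t 0 (-1)
    have h2 := pvM_init_irrel t hx 0 (-1) 0
    by_cases h : v = 0
    · simp only [h, ne_eq, not_true_eq_false, if_false]
      calc (PySem.List.enumerate t (0 + 1)).foldl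
            (fun (acc : Int) iv => if iv.2 ≠ 0 then iv.1 else acc) 0
          = (PySem.List.enumerate t (0 + 1)).foldl
            (fun (acc : Int) iv => if iv.2 ≠ 0 then iv.1 else acc) ((-1) + 1) := by norm_num
        _ = _ := by rw [h1, h2]
    · simp only [ne_eq, h, not_false_eq_true, if_true]
      calc (PySem.List.enumerate t (0 + 1)).foldl
            (fun (acc : Int) iv => if iv.2 ≠ 0 then iv.1 else acc) 0
          = (PySem.List.enumerate t (0 + 1)).foldl
            (fun (acc : Int) iv => if iv.2 ≠ 0 then iv.1 else acc) ((-1) + 1) := by norm_num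
        _ = _ := by rw [h1, h2]
  · simp only [hx, if_false]
    push_neg at hx
    by_cases h : v = 0
    · simp only [h, ne_eq, not_true_eq_false, if_false]
      exact pvM_allzero t hx (0 + 1) 0
    · simp only [ne_eq, h, not_false_eq_true, if_true]
      exact pvM_allzero t hx (0 + 1) 0

-- ---------- A-form = pvF ----------

lemma pvAform_eq_F (xs : List Int) : ∀ (c : Int), ((∃ x ∈ xs, x ≠ 0) ∨ c = 0) →
    (pvPfx c xs).take (pvM xs + 1).toNat
      ++ List.replicate (xs.length - (pvM xs + 1).toNat) 0 = pvF xs c := by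
  induction xs with
  | nil => intro c _; simp [pvPfx, pvF]
  | cons v t ih =>
      intro c hc
      by_cases hx : ∃ x ∈ t, x ≠ 0
      · have hm : pvM (v :: t) = pvM t + 1 := by rw [pvM_cons]; simp [hx]
        have hm0 : 0 ≤ pvM t := pvLast_nonneg t 0 0 le_rfl le_rfl
        have h1 : (pvM (v :: t) + 1).toNat = (pvM t + 1).toNat + 1 := by omega
        have hall : (v :: t).all (· == 0) = false := by
          rcases hx with ⟨x, hx1, hx2⟩
          simp only [List.all_eq_false]
          exact ⟨x, List.mem_cons_of_mem _ hx1, by simpa using hx2⟩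
        rw [h1]
        simp only [pvPfx, pvF, hall, List.take_succ_cons, List.length_cons,
          Bool.false_eq_true, if_false]
        have h2 : t.length + 1 - ((pvM t + 1).toNat + 1) = t.length - (pvM t + 1).toNat := by
          omega
        rw [h2, List.cons_append]
        congr 1
        exact ih (c + v) (Or.inl hx)
      · push_neg at hx
        have hnx : ¬ ∃ x ∈ t, x ≠ 0 := by push_neg; exact hx
        have hm : pvM (v :: t) = 0 := by rw [pvM_cons, if_neg hnx]
        rw [hm]
        simp only [pvPfx, Int.toNat_one, List.take_succ_cons, List.take_zero, List.length_cons]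
        by_cases h : v = 0
        · -- whole list all zero, so c = 0 by hypothesis
          have hc0 : c = 0 := by
            rcases hc with h' | h'
            · rcases h' with ⟨x, hx1, hx2⟩
              cases hx1 with
              | head => exact absurd h hx2
              | tail _ hmem => exact absurd (hx x hmem) hx2
            · exact h'
          have hall : ∀ x ∈ v :: t, x = 0 := by
            intro x hxm; cases hxm with
            | head => exact h
            | tail _ hmem => exact hx x hmem
          rw [pvF_allzero _ c hall]
          simp only [List.length_cons, hc0, h]
          norm_num [List.replicate_succ]
        · have hall : (v :: t).all (· == 0) = false := by
            simp only [List.all_eq_false]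
            exact ⟨v, List.mem_cons_self, by simpa using h⟩
          simp only [pvF, hall, Bool.false_eq_true, if_false]
          rw [pvF_allzero t (c + v) hx]
          norm_num

-- ---------- B = pvF ----------

def pvCnt (xs : List Int) : Int := xs.foldl (fun a v => if v ≠ 0 then a + 1 else a) 0

lemma pvCnt_shift (xs : List Int) : ∀ (a : Int),
    xs.foldl (fun a v => if v ≠ 0 then a + 1 else a) a = a + pvCnt xs := by
  induction xs with
  | nil => intro a; simp [pvCnt]
  | cons v t ih =>
      intro a
      simp only [pvCnt, List.foldl_cons]
      rw [ih, ih]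
      split <;> omega

lemma pvCnt_nonneg (xs : List Int) : 0 ≤ pvCnt xs := by
  induction xs with
  | nil => simp [pvCnt]
  | cons v t ih =>
      simp only [pvCnt, List.foldl_cons]
      rw [pvCnt_shift]
      split <;> omega

lemma pvCnt_eq_zero (xs : List Int) : pvCnt xs = 0 ↔ ∀ x ∈ xs, x = 0 := by
  induction xs with
  | nil => simp [pvCnt]
  | cons v t ih =>
      simp only [pvCnt, List.foldl_cons]
      rw [pvCnt_shift]
      have ht := pvCnt_nonneg t
      constructor
      · intro h x hx
        by_cases hv : v = 0
        · simp only [hv, ne_eq, not_true_eq_false, if_false, zero_add] at h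
          cases hx with
          | head => exact hv
          | tail _ hmem => exact (ih.mp (by simpa [pvCnt] using h)) x hmem
        · simp only [ne_eq, hv, not_false_eq_true, if_true] at h; omega
      · intro h
        have hv := h v List.mem_cons_self
        simp only [hv, ne_eq, not_true_eq_false, if_false, zero_add]
        exact (by simpa [pvCnt] using ih.mpr (fun x hx => h x (List.mem_cons_of_mem _ hx)))

lemma pvCnt_cons (v : Int) (t : List Int) :
    pvCnt (v :: t) = (if v ≠ 0 then (1 : Int) else 0) + pvCnt t := by
  conv_lhs => rw [pvCnt]
  rw [List.foldl_cons, pvCnt_shift]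
  split <;> omega

-- remaining = 0 forever appends zeros
lemma pvBStep_zero (c : Int) (acc : List Int) (v : Int) :
    pvBStep (c, 0, acc) v = (c, 0, acc ++ [0]) := by
  simp [pvBStep]

lemma pvBzero (xs : List Int) : ∀ (c : Int) (acc : List Int),
    (xs.foldl pvBStep (c, 0, acc)).2.2 = acc ++ List.replicate xs.length 0 := by
  induction xs with
  | nil => intro c acc; simp
  | cons v t ih =>
      intro c acc
      rw [List.foldl_cons, pvBStep_zero, ih]
      simp [List.replicate_succ]

lemma pvB_inv (xs : List Int) : ∀ (c : Int) (acc : List Int),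
    (xs.foldl pvBStep (c, pvCnt xs, acc)).2.2 = acc ++ pvF xs c := by
  induction xs with
  | nil => intro c acc; simp [pvF]
  | cons v t ih =>
      intro c acc
      by_cases hz : pvCnt (v :: t) = 0
      · have hall := (pvCnt_eq_zero (v :: t)).mp hz
        rw [hz, pvBzero, pvF_allzero _ c hall]
      · have hallb : (v :: t).all (· == 0) = false := by
          cases hb : (v :: t).all (· == 0) with
          | false => rfl
          | true =>
              exact absurd ((pvCnt_eq_zero _).mpr
                (fun x hx => by simpa using List.all_eq_true.mp hb x hx)) hz
        rw [List.foldl_cons]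
        by_cases h : v = 0
        · have hc' : pvCnt (v :: t) = pvCnt t := by rw [pvCnt_cons]; simp [h]
          have hstep : pvBStep (c, pvCnt (v :: t), acc) v
              = (c + v, pvCnt t, acc ++ [c + v]) := by
            simp only [pvBStep]
            rw [if_neg hz, if_neg (show ¬ (v ≠ 0) by simp [h]), hc']
          rw [hstep, ih (c + v) (acc ++ [c + v])]
          simp only [pvF, hallb, Bool.false_eq_true, if_false]
          simp
        · have hc' : pvCnt (v :: t) - 1 = pvCnt t := by rw [pvCnt_cons]; simp [h]
          have hstep : pvBStep (c, pvCnt (v :: t), acc) v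
              = (c + v, pvCnt t, acc ++ [c + v]) := by
            simp only [pvBStep]
            rw [if_neg hz, if_pos h, hc']
          rw [hstep, ih (c + v) (acc ++ [c + v])]
          simp only [pvF, hallb, Bool.false_eq_true, if_false]
          simp

-- ===== VERDICT (by name: the statement is the Claim_ definition above) =====
theorem get_heuristic_array_from_variations_spec : Claim_equal_get_heuristic_array_from_variations := by
  intro xs _
  unfold Spec_get_heuristic_array_from_variations
  unfold get_heuristic_array_from_variations get_heuristic_array_from_variations_alt
  simp only []
  -- A's backward break-scan computes the last-nonzero fold pvM
  have hfind : pvAFind xs ((PySem.List.pyRange 0 (PySem.List.len xs) 1).reverse) = pvM xs := by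
    rw [pvAFind_rev, pvM]
    rw [PySem.List.enumerate_eq_map_pyRange (d := 0), List.foldl_map]
  rw [hfind]
  -- A's main loop = take/replicate form (via the enumerate invariant)
  have hA : (PySem.List.pyRange 0 (PySem.List.len xs) 1).foldl
      (fun (st : Int × List Int) i =>
        if i ≤ pvM xs then (st.1 + PySem.List.pyGetD xs i 0, st.2 ++ [st.1 + PySem.List.pyGetD xs i 0])
        else (st.1, st.2 ++ [0])) (0, [])
      = (PySem.List.enumerate xs 0).foldl
      (fun (st : Int × List Int) (p : Int × Int) =>
        if p.1 ≤ pvM xs then (st.1 + p.2, st.2 ++ [st.1 + p.2]) else (st.1, st.2 ++ [0])) (0, []) := by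
    rw [PySem.List.enumerate_eq_map_pyRange (d := 0), List.foldl_map]
  rw [hA, pvLoop_inv]
  simp only [List.nil_append, Int.sub_zero]
  -- B's loop starts from its computed count, which is pvCnt
  have hcnt : xs.foldl (fun a v => if v ≠ 0 then a + 1 else a) 0 = pvCnt xs := rfl
  rw [hcnt, pvB_inv xs 0 []]
  simp only [List.nil_append]
  exact pvAform_eq_F xs 0 (Or.inr rfl)
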